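-- pv_equiv track=rewrite | github.com/aszczi/Python | Programowanie_skryptowe_07/main.py | find_fours
-- ===== SOURCE A (Python) =====
-- def find_fours(grid):
--     n = len(grid)
--     fours = []
--
--     #wiersze
--     for i in range(n):
--         for j in range(n - 3):
--             if grid[i][j] == grid[i][j + 1] == grid[i][j + 2] == grid[i][j + 3]:
--                 fours.append([(i, j), (i, j + 1), (i, j + 2), (i, j + 3)])
--
--     #kolumny
--     for i in range(n - 3):
--         for j in range(n):
--             if grid[i][j] == grid[i + 1][j] == grid[i + 2][j] == grid[i + 3][j]:
--                 fours.append([(i, j), (i + 1, j), (i + 2, j), (i + 3, j)])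
--
--     #przekatne
--     for i in range(n - 3):
--         for j in range(n - 3):
--             if grid[i][j] == grid[i + 1][j + 1] == grid[i + 2][j + 2] == grid[i + 3][j + 3]:
--                 fours.append([(i, j), (i + 1, j + 1), (i + 2, j + 2), (i + 3, j + 3)])
--
--             if grid[i][j + 3] == grid[i + 1][j + 2] == grid[i + 2][j + 1] == grid[i + 3][j]:
--                 fours.append([(i, j + 3), (i + 1, j + 2), (i + 2, j + 1), (i + 3, j)])
--
--     return fours
-- ===== SOURCE B (Python) =====
-- def find_fours(grid):
--     n = len(grid)
--     if n < 4:
--         return []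
--     rows, cols, diags = [], [], []
--     vrun = [0] * n
--     mrun = [0] * n
--     arun = [0] * n
--     for i in range(n):
--         row = grid[i]
--         prev = grid[i - 1] if i > 0 else None
--         # run lengths ending at each cell of this row, per direction
--         hr = []
--         r = 0
--         for j in range(n):
--             r = r + 1 if j > 0 and row[j] == row[j - 1] else 1
--             hr.append(r)
--         vrun = [vrun[j] + 1 if prev is not None and row[j] == prev[j] else 1
--                 for j in range(n)]
--         mrun = [mrun[j - 1] + 1 if prev is not None and j > 0 and row[j] == prev[j - 1] else 1
--                 for j in range(n)]
--         arun = [arun[j + 1] + 1 if prev is not None and j + 1 < n and row[j] == prev[j + 1] else 1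
--                 for j in range(n)]
--         for j in range(n):
--             if hr[j] >= 4:
--                 rows.append([(i, j - 3), (i, j - 2), (i, j - 1), (i, j)])
--         for j in range(n):
--             if vrun[j] >= 4:
--                 cols.append([(i - 3, j), (i - 2, j), (i - 1, j), (i, j)])
--         for j in range(n - 3):
--             if mrun[j + 3] >= 4:
--                 diags.append([(i - 3, j), (i - 2, j + 1), (i - 1, j + 2), (i, j + 3)])
--             if arun[j] >= 4:
--                 diags.append([(i - 3, j + 3), (i - 2, j + 2), (i - 1, j + 1), (i, j)])
--     return rows + cols + diags
-- ===== Notes on version B (the rewrite author's own statement) =====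
-- stated objective: alternative
-- what changed: Replaces the per-window 4-cell equality checks of each pass with a single top-to-bottom sweep maintaining run lengths of consecutive equal cells (a scalar for rows, one array per column/diagonal direction), emitting a four whenever a run reaches 4, with emission order arranged to match A exactly.
import Mathlib
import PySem

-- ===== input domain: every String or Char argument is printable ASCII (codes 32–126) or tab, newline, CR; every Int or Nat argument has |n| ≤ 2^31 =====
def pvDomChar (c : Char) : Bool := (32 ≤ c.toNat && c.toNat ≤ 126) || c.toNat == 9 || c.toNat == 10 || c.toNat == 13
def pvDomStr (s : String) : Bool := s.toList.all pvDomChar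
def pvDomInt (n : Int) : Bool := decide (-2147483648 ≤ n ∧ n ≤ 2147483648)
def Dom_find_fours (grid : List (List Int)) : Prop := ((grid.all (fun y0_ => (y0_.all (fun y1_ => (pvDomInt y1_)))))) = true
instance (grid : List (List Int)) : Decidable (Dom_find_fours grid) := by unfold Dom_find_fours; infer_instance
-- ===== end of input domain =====

-- B replaces A's fixed 4-cell window checks by a top-to-bottom sweep that maintains
-- run lengths of consecutive equal cells per direction (alternative decomposition, same cost).


-- ===== PORT A =====
-- grid[i][j] (indices are in range under Pre_, so the default never fires)
def pvCell (grid : List (List Int)) (i j : Int) : Int :=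
  PySem.List.pyGetD (PySem.List.pyGetD grid i []) j 0

def find_fours (grid : List (List Int)) : List (List (Int × Int)) :=
  let n : Int := grid.length
  let fours : List (List (Int × Int)) := []
  -- wiersze
  let fours := (PySem.List.pyRange 0 n 1).foldl (fun acc i =>
    (PySem.List.pyRange 0 (n - 3) 1).foldl (fun acc j =>
      if pvCell grid i j = pvCell grid i (j + 1) ∧ pvCell grid i (j + 1) = pvCell grid i (j + 2) ∧ pvCell grid i (j + 2) = pvCell grid i (j + 3)
      then acc ++ [[(i, j), (i, j + 1), (i, j + 2), (i, j + 3)]] else acc) acc) fours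
  -- kolumny
  let fours := (PySem.List.pyRange 0 (n - 3) 1).foldl (fun acc i =>
    (PySem.List.pyRange 0 n 1).foldl (fun acc j =>
      if pvCell grid i j = pvCell grid (i + 1) j ∧ pvCell grid (i + 1) j = pvCell grid (i + 2) j ∧ pvCell grid (i + 2) j = pvCell grid (i + 3) j
      then acc ++ [[(i, j), (i + 1, j), (i + 2, j), (i + 3, j)]] else acc) acc) fours
  -- przekatne
  let fours := (PySem.List.pyRange 0 (n - 3) 1).foldl (fun acc i =>
    (PySem.List.pyRange 0 (n - 3) 1).foldl (fun acc j =>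
      let acc := if pvCell grid i j = pvCell grid (i + 1) (j + 1) ∧ pvCell grid (i + 1) (j + 1) = pvCell grid (i + 2) (j + 2) ∧ pvCell grid (i + 2) (j + 2) = pvCell grid (i + 3) (j + 3)
        then acc ++ [[(i, j), (i + 1, j + 1), (i + 2, j + 2), (i + 3, j + 3)]] else acc
      if pvCell grid i (j + 3) = pvCell grid (i + 1) (j + 2) ∧ pvCell grid (i + 1) (j + 2) = pvCell grid (i + 2) (j + 1) ∧ pvCell grid (i + 2) (j + 1) = pvCell grid (i + 3) j
        then acc ++ [[(i, j + 3), (i + 1, j + 2), (i + 2, j + 1), (i + 3, j)]] else acc) acc) fours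
  fours

-- ===== PORT B =====
-- sweep state: run-length arrays for the three non-horizontal directions plus the three output lists
structure pvBState where
  vrun : List Int
  mrun : List Int
  arun : List Int
  rows : List (List (Int × Int))
  cols : List (List (Int × Int))
  diags : List (List (Int × Int))

-- Source B's `hr` loop: horizontal run length ending at each cell of `row`
def pvHr (row : List Int) (n : Int) : List Int :=
  ((PySem.List.pyRange 0 n 1).foldl (fun (p : Int × List Int) j =>
      let r := if 0 < j ∧ PySem.List.pyGetD row j 0 = PySem.List.pyGetD row (j - 1) 0 then p.1 + 1 else 1
      (r, p.2 ++ [r])) ((0 : Int), ([] : List Int))).2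

-- one row of the sweep (body of Source B's `for i in range(n)`)
def pvRowStep (grid : List (List Int)) (n : Int) (st : pvBState) (i : Int) : pvBState :=
  let row := PySem.List.pyGetD grid i []
  let hr := pvHr row n
  let vrun := (PySem.List.pyRange 0 n 1).map (fun j =>
      if 0 < i ∧ PySem.List.pyGetD row j 0 = pvCell grid (i - 1) j
      then PySem.List.pyGetD st.vrun j 0 + 1 else 1)
  let mrun := (PySem.List.pyRange 0 n 1).map (fun j =>
      if 0 < i ∧ 0 < j ∧ PySem.List.pyGetD row j 0 = pvCell grid (i - 1) (j - 1)
      then PySem.List.pyGetD st.mrun (j - 1) 0 + 1 else 1)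
  let arun := (PySem.List.pyRange 0 n 1).map (fun j =>
      if 0 < i ∧ j + 1 < n ∧ PySem.List.pyGetD row j 0 = pvCell grid (i - 1) (j + 1)
      then PySem.List.pyGetD st.arun (j + 1) 0 + 1 else 1)
  let rows := (PySem.List.pyRange 0 n 1).foldl (fun acc j =>
      if 4 ≤ PySem.List.pyGetD hr j 0
      then acc ++ [[(i, j - 3), (i, j - 2), (i, j - 1), (i, j)]] else acc) st.rows
  let cols := (PySem.List.pyRange 0 n 1).foldl (fun acc j =>
      if 4 ≤ PySem.List.pyGetD vrun j 0
      then acc ++ [[(i - 3, j), (i - 2, j), (i - 1, j), (i, j)]] else acc) st.cols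
  let diags := (PySem.List.pyRange 0 (n - 3) 1).foldl (fun acc j =>
      let acc := if 4 ≤ PySem.List.pyGetD mrun (j + 3) 0
        then acc ++ [[(i - 3, j), (i - 2, j + 1), (i - 1, j + 2), (i, j + 3)]] else acc
      if 4 ≤ PySem.List.pyGetD arun j 0
        then acc ++ [[(i - 3, j + 3), (i - 2, j + 2), (i - 1, j + 1), (i, j)]] else acc) st.diags
  ⟨vrun, mrun, arun, rows, cols, diags⟩

def find_fours_alt (grid : List (List Int)) : List (List (Int × Int)) :=
  let n : Int := grid.length
  if n < 4 then [] else
    let init : pvBState := ⟨List.replicate grid.length 0, List.replicate grid.length 0,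
                            List.replicate grid.length 0, [], [], []⟩
    let st := (PySem.List.pyRange 0 n 1).foldl (pvRowStep grid n) init
    st.rows ++ st.cols ++ st.diags

-- ===== PRECONDITION & SPEC =====
-- Pre_ excludes exactly the grids on which the Python A raises IndexError:
-- when len(grid) = n ≥ 4, A reads columns 0..n-1 of every row, so each row must have length ≥ n.
def Pre_find_fours (grid : List (List Int)) : Prop :=
  4 ≤ grid.length → ∀ row ∈ grid, grid.length ≤ row.length
instance (grid : List (List Int)) : Decidable (Pre_find_fours grid) := by
  unfold Pre_find_fours; infer_instance

def pvWitness_find_fours : List (List Int) :=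
  [[1, 1, 1, 1], [1, 2, 2, 2], [1, 2, 1, 3], [1, 3, 3, 1]]

def Spec_find_fours (grid : List (List Int)) (out : List (List (Int × Int))) : Prop := out = find_fours_alt grid
instance (grid : List (List Int)) (out : List (List (Int × Int))) : Decidable (Spec_find_fours grid out) := by unfold Spec_find_fours; infer_instance

-- ===== CLAIM (what is proved, stated in full; the proofs are below) =====
def Claim_equal_find_fours : Prop := ∀ (grid : List (List Int)), Dom_find_fours grid → Pre_find_fours grid → Spec_find_fours grid (find_fours grid)

-- ===== LEMMAS AND PROOFS =====


def hrunF (row : List Int) (j : Int) : Int :=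
  if h : 0 < j ∧ PySem.List.pyGetD row j 0 = PySem.List.pyGetD row (j - 1) 0
  then hrunF row (j - 1) + 1 else 1
termination_by j.toNat
decreasing_by omega

lemma hrunF_succ_iff (row : List Int) (j m : Int) (hm : 1 ≤ m) :
    m + 1 ≤ hrunF row j ↔
      ((0 < j ∧ PySem.List.pyGetD row j 0 = PySem.List.pyGetD row (j - 1) 0) ∧ m ≤ hrunF row (j - 1)) := by
  rw [hrunF]
  split_ifs with h
  · constructor
    · intro hle; exact ⟨h, by omega⟩
    · rintro ⟨-, h2⟩; omega
  · constructor
    · intro hle; omega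
    · rintro ⟨hc, -⟩; exact absurd hc h

lemma hrunF_pos (row : List Int) (j : Int) : 1 ≤ hrunF row j := by
  fun_induction hrunF <;> omega

lemma hrunF_ge4_iff (row : List Int) (j : Int) :
    4 ≤ hrunF row j ↔ 3 ≤ j ∧
      (PySem.List.pyGetD row (j - 3) 0 = PySem.List.pyGetD row (j - 2) 0 ∧
       PySem.List.pyGetD row (j - 2) 0 = PySem.List.pyGetD row (j - 1) 0 ∧
       PySem.List.pyGetD row (j - 1) 0 = PySem.List.pyGetD row j 0) := by
  rw [show (4:Int) = 3 + 1 by norm_num, hrunF_succ_iff row j 3 (by norm_num),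
      show (3:Int) = 2 + 1 by norm_num, hrunF_succ_iff row (j - 1) 2 (by norm_num),
      show (2:Int) = 1 + 1 by norm_num, hrunF_succ_iff row (j - 1 - 1) 1 (by norm_num)]
  rw [show j - 1 - 1 - 1 = j - 3 by ring, show j - 1 - 1 = j - 2 by ring]
  simp only [hrunF_pos, and_true]
  constructor
  · rintro ⟨⟨hj, a1⟩, ⟨hj1, a2⟩, ⟨hj2, a3⟩⟩
    exact ⟨by omega, a3.symm, a2.symm, a1.symm⟩
  · rintro ⟨hj, b1, b2, b3⟩
    exact ⟨⟨by omega, b3.symm⟩, ⟨by omega, b2.symm⟩, ⟨by omega, b1.symm⟩⟩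

def vrunF (grid : List (List Int)) (i j : Int) : Int :=
  if h : 0 < i ∧ pvCell grid i j = pvCell grid (i - 1) j
  then vrunF grid (i - 1) j + 1 else 1
termination_by i.toNat
decreasing_by omega

lemma vrunF_succ_iff (grid : List (List Int)) (i j m : Int) (hm : 1 ≤ m) :
    m + 1 ≤ vrunF grid i j ↔
      ((0 < i ∧ pvCell grid i j = pvCell grid (i - 1) j) ∧ m ≤ vrunF grid (i - 1) j) := by
  rw [vrunF]
  split_ifs with h
  · constructor
    · intro hle; exact ⟨h, by omega⟩
    · rintro ⟨-, h2⟩; omega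
  · constructor
    · intro hle; omega
    · rintro ⟨hc, -⟩; exact absurd hc h

lemma vrunF_pos (grid : List (List Int)) (i j : Int) : 1 ≤ vrunF grid i j := by
  fun_induction vrunF <;> omega

lemma vrunF_ge4_iff (grid : List (List Int)) (i j : Int) :
    4 ≤ vrunF grid i j ↔ 3 ≤ i ∧
      (pvCell grid (i - 3) j = pvCell grid (i - 2) j ∧
       pvCell grid (i - 2) j = pvCell grid (i - 1) j ∧
       pvCell grid (i - 1) j = pvCell grid i j) := by
  rw [show (4:Int) = 3 + 1 by norm_num, vrunF_succ_iff grid i j 3 (by norm_num),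
      show (3:Int) = 2 + 1 by norm_num, vrunF_succ_iff grid (i - 1) j 2 (by norm_num),
      show (2:Int) = 1 + 1 by norm_num, vrunF_succ_iff grid (i - 1 - 1) j 1 (by norm_num)]
  rw [show i - 1 - 1 - 1 = i - 3 by ring, show i - 1 - 1 = i - 2 by ring]
  simp only [vrunF_pos, and_true]
  constructor
  · rintro ⟨⟨hi, a1⟩, ⟨hi1, a2⟩, ⟨hi2, a3⟩⟩
    exact ⟨by omega, a3.symm, a2.symm, a1.symm⟩
  · rintro ⟨hi, b1, b2, b3⟩
    exact ⟨⟨by omega, b3.symm⟩, ⟨by omega, b2.symm⟩, ⟨by omega, b1.symm⟩⟩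

def mrunF (grid : List (List Int)) (i j : Int) : Int :=
  if h : 0 < i ∧ 0 < j ∧ pvCell grid i j = pvCell grid (i - 1) (j - 1)
  then mrunF grid (i - 1) (j - 1) + 1 else 1
termination_by i.toNat
decreasing_by omega

lemma mrunF_succ_iff (grid : List (List Int)) (i j m : Int) (hm : 1 ≤ m) :
    m + 1 ≤ mrunF grid i j ↔
      ((0 < i ∧ 0 < j ∧ pvCell grid i j = pvCell grid (i - 1) (j - 1)) ∧ m ≤ mrunF grid (i - 1) (j - 1)) := by
  rw [mrunF]
  split_ifs with h
  · constructor
    · intro hle; exact ⟨h, by omega⟩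
    · rintro ⟨-, h2⟩; omega
  · constructor
    · intro hle; omega
    · rintro ⟨hc, -⟩; exact absurd hc h

lemma mrunF_pos (grid : List (List Int)) (i j : Int) : 1 ≤ mrunF grid i j := by
  fun_induction mrunF <;> omega

lemma mrunF_ge4_iff (grid : List (List Int)) (i j : Int) :
    4 ≤ mrunF grid i j ↔ 3 ≤ i ∧ 3 ≤ j ∧
      (pvCell grid (i - 3) (j - 3) = pvCell grid (i - 2) (j - 2) ∧
       pvCell grid (i - 2) (j - 2) = pvCell grid (i - 1) (j - 1) ∧
       pvCell grid (i - 1) (j - 1) = pvCell grid i j) := by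
  rw [show (4:Int) = 3 + 1 by norm_num, mrunF_succ_iff grid i j 3 (by norm_num),
      show (3:Int) = 2 + 1 by norm_num, mrunF_succ_iff grid (i - 1) (j - 1) 2 (by norm_num),
      show (2:Int) = 1 + 1 by norm_num, mrunF_succ_iff grid (i - 1 - 1) (j - 1 - 1) 1 (by norm_num)]
  rw [show i - 1 - 1 - 1 = i - 3 by ring, show i - 1 - 1 = i - 2 by ring,
      show j - 1 - 1 - 1 = j - 3 by ring, show j - 1 - 1 = j - 2 by ring]
  simp only [mrunF_pos, and_true]
  constructor
  · rintro ⟨⟨hi, hj, a1⟩, ⟨hi1, hj1, a2⟩, ⟨hi2, hj2, a3⟩⟩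
    exact ⟨by omega, by omega, a3.symm, a2.symm, a1.symm⟩
  · rintro ⟨hi, hj, b1, b2, b3⟩
    exact ⟨⟨by omega, by omega, b3.symm⟩, ⟨by omega, by omega, b2.symm⟩, ⟨by omega, by omega, b1.symm⟩⟩

def arunF (grid : List (List Int)) (n : Int) (i j : Int) : Int :=
  if h : 0 < i ∧ j + 1 < n ∧ pvCell grid i j = pvCell grid (i - 1) (j + 1)
  then arunF grid n (i - 1) (j + 1) + 1 else 1
termination_by i.toNat
decreasing_by omega

lemma arunF_succ_iff (grid : List (List Int)) (n i j m : Int) (hm : 1 ≤ m) :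
    m + 1 ≤ arunF grid n i j ↔
      ((0 < i ∧ j + 1 < n ∧ pvCell grid i j = pvCell grid (i - 1) (j + 1)) ∧ m ≤ arunF grid n (i - 1) (j + 1)) := by
  rw [arunF]
  split_ifs with h
  · constructor
    · intro hle; exact ⟨h, by omega⟩
    · rintro ⟨-, h2⟩; omega
  · constructor
    · intro hle; omega
    · rintro ⟨hc, -⟩; exact absurd hc h

lemma arunF_pos (grid : List (List Int)) (n i j : Int) : 1 ≤ arunF grid n i j := by
  fun_induction arunF <;> omega

lemma arunF_ge4_iff (grid : List (List Int)) (n i j : Int) :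
    4 ≤ arunF grid n i j ↔ 3 ≤ i ∧ j + 3 < n ∧
      (pvCell grid (i - 3) (j + 3) = pvCell grid (i - 2) (j + 2) ∧
       pvCell grid (i - 2) (j + 2) = pvCell grid (i - 1) (j + 1) ∧
       pvCell grid (i - 1) (j + 1) = pvCell grid i j) := by
  rw [show (4:Int) = 3 + 1 by norm_num, arunF_succ_iff grid n i j 3 (by norm_num),
      show (3:Int) = 2 + 1 by norm_num, arunF_succ_iff grid n (i - 1) (j + 1) 2 (by norm_num),
      show (2:Int) = 1 + 1 by norm_num, arunF_succ_iff grid n (i - 1 - 1) (j + 1 + 1) 1 (by norm_num)]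
  rw [show i - 1 - 1 - 1 = i - 3 by ring, show i - 1 - 1 = i - 2 by ring,
      show j + 1 + 1 + 1 = j + 3 by ring, show j + 1 + 1 = j + 2 by ring]
  simp only [arunF_pos, and_true]
  constructor
  · rintro ⟨⟨hi, hj, a1⟩, ⟨hi1, hj1, a2⟩, ⟨hi2, hj2, a3⟩⟩
    exact ⟨by omega, by omega, a3.symm, a2.symm, a1.symm⟩
  · rintro ⟨hi, hj, b1, b2, b3⟩
    exact ⟨⟨by omega, by omega, b3.symm⟩, ⟨by omega, by omega, b2.symm⟩, ⟨by omega, by omega, b1.symm⟩⟩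

lemma pvShiftFilterMap {α : Type} (L : Int) (P : Int → Prop) [DecidablePred P] (f : Int → α) :
    ((PySem.List.pyRange 0 L 1).filter (fun j => decide (3 ≤ j ∧ P (j - 3)))).map (fun j => f (j - 3)) =
    ((PySem.List.pyRange 0 (L - 3) 1).filter (fun j => decide (P j))).map f := by
  by_cases hL : L ≤ 3
  · have h1 : PySem.List.pyRange 0 (L - 3) 1 = [] := PySem.List.pyRange_one_eq_nil (by omega)
    have h2 : (PySem.List.pyRange 0 L 1).filter (fun j => decide (3 ≤ j ∧ P (j - 3))) = [] := by
      rw [List.filter_eq_nil_iff]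
      intro j hj
      have hb := (PySem.List.mem_pyRange_one).1 hj
      simp only [decide_eq_true_eq, not_and]
      intro h3j; omega
    rw [h1, h2]; simp
  · rw [PySem.List.pyRange_one_append 0 3 L (by norm_num) (by omega), List.filter_append, List.map_append]
    have hfirst : (PySem.List.pyRange 0 3 1).filter (fun j => decide (3 ≤ j ∧ P (j - 3))) = [] := by
      rw [List.filter_eq_nil_iff]
      intro j hj
      have hb := (PySem.List.mem_pyRange_one).1 hj
      simp only [decide_eq_true_eq, not_and]
      intro h3j; omega
    rw [hfirst]
    simp only [List.map_nil, List.nil_append]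
    rw [PySem.List.pyRange_one 3 L, PySem.List.pyRange_one 0 (L - 3),
        show L - 3 - 0 = L - 3 by ring, List.filter_map, List.filter_map, List.map_map, List.map_map]
    have hfilter : List.filter ((fun j => decide (3 ≤ j ∧ P (j - 3))) ∘ fun k : Nat => (3:Int) + (k:Int)) (List.range (L - 3).toNat)
        = List.filter ((fun j => decide (P j)) ∘ fun k : Nat => (0:Int) + (k:Int)) (List.range (L - 3).toNat) := by
      apply List.filter_congr
      intro k _
      simp only [Function.comp_apply, decide_eq_decide]
      constructor
      · rintro ⟨-, hp⟩; rwa [show (3:Int) + (k:Int) - 3 = 0 + (k:Int) by ring] at hp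
      · intro hp
        exact ⟨by omega, by rw [show (3:Int) + (k:Int) - 3 = 0 + (k:Int) by ring]; exact hp⟩
    rw [hfilter]
    apply List.map_congr_left
    intro k _
    simp only [Function.comp_apply]
    rw [show (3:Int) + (k:Int) - 3 = 0 + (k:Int) by ring]

lemma pvShiftFlatMap {α : Type} (L : Int) (G F : Int → List α)
    (hlow : ∀ i : Int, 0 ≤ i → i < 3 → G i = [])
    (hhigh : ∀ i : Int, 3 ≤ i → i < L → G i = F (i - 3)) :
    (PySem.List.pyRange 0 L 1).flatMap G = (PySem.List.pyRange 0 (L - 3) 1).flatMap F := by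
  by_cases hL : L ≤ 3
  · rw [PySem.List.pyRange_one_eq_nil (show L - 3 ≤ 0 by omega)]
    simp only [List.flatMap_nil]
    rw [List.flatMap_eq_nil_iff]
    intro i hi
    have hb := (PySem.List.mem_pyRange_one).1 hi
    exact hlow i hb.1 (by omega)
  · rw [PySem.List.pyRange_one_append 0 3 L (by norm_num) (by omega), List.flatMap_append]
    have hfirst : (PySem.List.pyRange 0 3 1).flatMap G = [] := by
      rw [List.flatMap_eq_nil_iff]
      intro i hi
      have hb := (PySem.List.mem_pyRange_one).1 hi
      exact hlow i hb.1 (by omega)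
    rw [hfirst, List.nil_append]
    rw [PySem.List.pyRange_one 3 L, PySem.List.pyRange_one 0 (L - 3),
        show L - 3 - 0 = L - 3 by ring]
    simp only [List.flatMap_def, List.map_map]
    congr 1
    apply List.map_congr_left
    intro k hk
    have hk' : k < (L - 3).toNat := List.mem_range.1 hk
    simp only [Function.comp_apply]
    rw [hhigh ((3:Int) + (k:Int)) (by omega) (by omega),
        show (3:Int) + (k:Int) - 3 = 0 + (k:Int) by ring]


-- spec-level window conditions and normal forms of the two ports
def pvRowsSpec (grid : List (List Int)) : List (List (Int × Int)) :=
  (PySem.List.pyRange 0 (grid.length : Int) 1).flatMap (fun i =>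
    ((PySem.List.pyRange 0 ((grid.length : Int) - 3) 1).filter (fun j =>
        decide (pvCell grid i j = pvCell grid i (j + 1) ∧ pvCell grid i (j + 1) = pvCell grid i (j + 2) ∧ pvCell grid i (j + 2) = pvCell grid i (j + 3)))).map
      (fun j => [(i, j), (i, j + 1), (i, j + 2), (i, j + 3)]))

def pvColsSpec (grid : List (List Int)) : List (List (Int × Int)) :=
  (PySem.List.pyRange 0 ((grid.length : Int) - 3) 1).flatMap (fun i =>
    ((PySem.List.pyRange 0 (grid.length : Int) 1).filter (fun j =>
        decide (pvCell grid i j = pvCell grid (i + 1) j ∧ pvCell grid (i + 1) j = pvCell grid (i + 2) j ∧ pvCell grid (i + 2) j = pvCell grid (i + 3) j))).map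
      (fun j => [(i, j), (i + 1, j), (i + 2, j), (i + 3, j)]))

def pvDiagsSpec (grid : List (List Int)) : List (List (Int × Int)) :=
  (PySem.List.pyRange 0 ((grid.length : Int) - 3) 1).flatMap (fun i =>
    (PySem.List.pyRange 0 ((grid.length : Int) - 3) 1).flatMap (fun j =>
      (if pvCell grid i j = pvCell grid (i + 1) (j + 1) ∧ pvCell grid (i + 1) (j + 1) = pvCell grid (i + 2) (j + 2) ∧ pvCell grid (i + 2) (j + 2) = pvCell grid (i + 3) (j + 3)
       then [[(i, j), (i + 1, j + 1), (i + 2, j + 2), (i + 3, j + 3)]] else []) ++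
      (if pvCell grid i (j + 3) = pvCell grid (i + 1) (j + 2) ∧ pvCell grid (i + 1) (j + 2) = pvCell grid (i + 2) (j + 1) ∧ pvCell grid (i + 2) (j + 1) = pvCell grid (i + 3) j
       then [[(i, j + 3), (i + 1, j + 2), (i + 2, j + 1), (i + 3, j)]] else [])))

lemma pvDoubleIte {α : Type} (p q : Prop) [Decidable p] [Decidable q] (acc a b : List α) :
    (if q then (if p then acc ++ a else acc) ++ b else (if p then acc ++ a else acc))
      = acc ++ ((if p then a else []) ++ (if q then b else [])) := by
  split_ifs <;> simp

lemma find_fours_eq (grid : List (List Int)) :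
    find_fours grid = pvRowsSpec grid ++ pvColsSpec grid ++ pvDiagsSpec grid := by
  unfold find_fours pvRowsSpec pvColsSpec pvDiagsSpec
  simp only [PySem.List.foldl_append_ite, pvDoubleIte, PySem.List.foldl_append_eq_flatMap,
    List.nil_append, List.append_assoc]

-- ---- B side: run arrays and per-row emissions in spec form ----
lemma pvFlatMapCongr {α β : Type} (l : List α) (f g : α → List β) (h : ∀ x ∈ l, f x = g x) :
    l.flatMap f = l.flatMap g := by
  simp only [List.flatMap_def]
  exact congrArg List.flatten (List.map_congr_left h)

lemma pvHrFold (row : List Int) (t : Nat) :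
    ((PySem.List.pyRange 0 (t : Int) 1).foldl (fun (p : Int × List Int) j =>
      let r := if 0 < j ∧ PySem.List.pyGetD row j 0 = PySem.List.pyGetD row (j - 1) 0 then p.1 + 1 else 1
      (r, p.2 ++ [r])) ((0 : Int), ([] : List Int)))
    = ((if t = 0 then 0 else hrunF row ((t : Int) - 1)),
       (PySem.List.pyRange 0 (t : Int) 1).map (fun j => hrunF row j)) := by
  induction t with
  | zero => simp [PySem.List.pyRange_one_eq_nil (le_refl (0 : Int))]
  | succ t ih =>
    rw [show ((t + 1 : Nat) : Int) = (t : Int) + 1 by push_cast; ring,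
        PySem.List.pyRange_one_succ_right (by positivity), List.foldl_append, ih,
        List.foldl_cons, List.foldl_nil, List.map_append, List.map_cons, List.map_nil]
    have hval : (if 0 < (t : Int) ∧ PySem.List.pyGetD row (t : Int) 0 = PySem.List.pyGetD row ((t : Int) - 1) 0
        then (if t = 0 then 0 else hrunF row ((t : Int) - 1)) + 1 else 1) = hrunF row (t : Int) := by
      by_cases h : 0 < (t : Int) ∧ PySem.List.pyGetD row (t : Int) 0 = PySem.List.pyGetD row ((t : Int) - 1) 0
      · have ht0 : ¬ (t = 0) := by rcases h with ⟨h1, -⟩; omega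
        rw [if_pos h, if_neg ht0]
        conv_rhs => rw [hrunF]
        rw [dif_pos h]
      · rw [if_neg h]
        conv_rhs => rw [hrunF]
        rw [dif_neg h]
    simp only [hval]
    rw [if_neg (Nat.succ_ne_zero t), show (t : Int) + 1 - 1 = (t : Int) by ring]

lemma pvHr_eq (row : List Int) (t : Nat) :
    pvHr row (t : Int) = (PySem.List.pyRange 0 (t : Int) 1).map (fun j => hrunF row j) := by
  unfold pvHr
  rw [pvHrFold]

def pvVArr (grid : List (List Int)) (m : Nat) : List Int :=
  if m = 0 then List.replicate grid.length 0
  else (PySem.List.pyRange 0 (grid.length : Int) 1).map (fun j => vrunF grid ((m : Int) - 1) j)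

def pvMArr (grid : List (List Int)) (m : Nat) : List Int :=
  if m = 0 then List.replicate grid.length 0
  else (PySem.List.pyRange 0 (grid.length : Int) 1).map (fun j => mrunF grid ((m : Int) - 1) j)

def pvAArr (grid : List (List Int)) (m : Nat) : List Int :=
  if m = 0 then List.replicate grid.length 0
  else (PySem.List.pyRange 0 (grid.length : Int) 1).map (fun j => arunF grid (grid.length : Int) ((m : Int) - 1) j)

def pvRowEmit (grid : List (List Int)) (i : Int) : List (List (Int × Int)) :=
  ((PySem.List.pyRange 0 (grid.length : Int) 1).filter (fun j =>
      decide (4 ≤ hrunF (PySem.List.pyGetD grid i []) j))).map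
    (fun j => [(i, j - 3), (i, j - 2), (i, j - 1), (i, j)])

def pvColEmit (grid : List (List Int)) (i : Int) : List (List (Int × Int)) :=
  ((PySem.List.pyRange 0 (grid.length : Int) 1).filter (fun j =>
      decide (4 ≤ vrunF grid i j))).map
    (fun j => [(i - 3, j), (i - 2, j), (i - 1, j), (i, j)])

def pvDiagEmit (grid : List (List Int)) (i : Int) : List (List (Int × Int)) :=
  (PySem.List.pyRange 0 ((grid.length : Int) - 3) 1).flatMap (fun j =>
    (if 4 ≤ mrunF grid i (j + 3) then [[(i - 3, j), (i - 2, j + 1), (i - 1, j + 2), (i, j + 3)]] else []) ++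
    (if 4 ≤ arunF grid (grid.length : Int) i j then [[(i - 3, j + 3), (i - 2, j + 2), (i - 1, j + 1), (i, j)]] else []))

lemma pvVArr_succ (grid : List (List Int)) (m : Nat) :
    ((PySem.List.pyRange 0 (grid.length : Int) 1).map (fun j =>
      if 0 < (m : Int) ∧ PySem.List.pyGetD (PySem.List.pyGetD grid (m : Int) []) j 0 = pvCell grid ((m : Int) - 1) j
      then PySem.List.pyGetD (pvVArr grid m) j 0 + 1 else 1)) = pvVArr grid (m + 1) := by
  have hsucc : pvVArr grid (m + 1) = (PySem.List.pyRange 0 (grid.length : Int) 1).map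
      (fun j => vrunF grid (m : Int) j) := by
    unfold pvVArr
    rw [if_neg (Nat.succ_ne_zero m), show ((m + 1 : Nat) : Int) - 1 = (m : Int) by push_cast; ring]
  rw [hsucc]
  apply List.map_congr_left
  intro j hj
  have hb := (PySem.List.mem_pyRange_one).1 hj
  conv_rhs => rw [vrunF]
  simp only [pvCell]
  split_ifs with hc
  · have hm : m ≠ 0 := by
      rcases hc with ⟨h1, -⟩; omega
    have harr : pvVArr grid m = (PySem.List.pyRange 0 (grid.length : Int) 1).map
        (fun j => vrunF grid ((m : Int) - 1) j) := by
      unfold pvVArr; rw [if_neg hm]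
    rw [harr, PySem.List.pyGetD_map_pyRange_of_nonneg _ _ _ _ hb.1 hb.2]
  · rfl

lemma pvMArr_succ (grid : List (List Int)) (m : Nat) :
    ((PySem.List.pyRange 0 (grid.length : Int) 1).map (fun j =>
      if 0 < (m : Int) ∧ 0 < j ∧ PySem.List.pyGetD (PySem.List.pyGetD grid (m : Int) []) j 0 = pvCell grid ((m : Int) - 1) (j - 1)
      then PySem.List.pyGetD (pvMArr grid m) (j - 1) 0 + 1 else 1)) = pvMArr grid (m + 1) := by
  have hsucc : pvMArr grid (m + 1) = (PySem.List.pyRange 0 (grid.length : Int) 1).map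
      (fun j => mrunF grid (m : Int) j) := by
    unfold pvMArr
    rw [if_neg (Nat.succ_ne_zero m), show ((m + 1 : Nat) : Int) - 1 = (m : Int) by push_cast; ring]
  rw [hsucc]
  apply List.map_congr_left
  intro j hj
  have hb := (PySem.List.mem_pyRange_one).1 hj
  conv_rhs => rw [mrunF]
  simp only [pvCell]
  split_ifs with hc
  · have hm : m ≠ 0 := by
      rcases hc with ⟨h1, -⟩; omega
    have harr : pvMArr grid m = (PySem.List.pyRange 0 (grid.length : Int) 1).map
        (fun j => mrunF grid ((m : Int) - 1) j) := by
      unfold pvMArr; rw [if_neg hm]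
    rw [harr, PySem.List.pyGetD_map_pyRange_of_nonneg _ _ _ _ (by omega : (0:Int) ≤ j - 1) (by omega : j - 1 < (grid.length : Int))]
  · rfl

lemma pvAArr_succ (grid : List (List Int)) (m : Nat) :
    ((PySem.List.pyRange 0 (grid.length : Int) 1).map (fun j =>
      if 0 < (m : Int) ∧ j + 1 < (grid.length : Int) ∧ PySem.List.pyGetD (PySem.List.pyGetD grid (m : Int) []) j 0 = pvCell grid ((m : Int) - 1) (j + 1)
      then PySem.List.pyGetD (pvAArr grid m) (j + 1) 0 + 1 else 1)) = pvAArr grid (m + 1) := by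
  have hsucc : pvAArr grid (m + 1) = (PySem.List.pyRange 0 (grid.length : Int) 1).map
      (fun j => arunF grid (grid.length : Int) (m : Int) j) := by
    unfold pvAArr
    rw [if_neg (Nat.succ_ne_zero m), show ((m + 1 : Nat) : Int) - 1 = (m : Int) by push_cast; ring]
  rw [hsucc]
  apply List.map_congr_left
  intro j hj
  have hb := (PySem.List.mem_pyRange_one).1 hj
  conv_rhs => rw [arunF]
  simp only [pvCell]
  split_ifs with hc
  · have hm : m ≠ 0 := by
      rcases hc with ⟨h1, -⟩; omega
    have harr : pvAArr grid m = (PySem.List.pyRange 0 (grid.length : Int) 1).map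
        (fun j => arunF grid (grid.length : Int) ((m : Int) - 1) j) := by
      unfold pvAArr; rw [if_neg hm]
    rw [harr, PySem.List.pyGetD_map_pyRange_of_nonneg _ _ _ _ (by omega : (0:Int) ≤ j + 1) hc.2.1]
  · rfl

lemma pvRowStep_spec (grid : List (List Int)) (m : Nat) (R C D : List (List (Int × Int))) :
    pvRowStep grid (grid.length : Int) ⟨pvVArr grid m, pvMArr grid m, pvAArr grid m, R, C, D⟩ (m : Int)
    = ⟨pvVArr grid (m + 1), pvMArr grid (m + 1), pvAArr grid (m + 1),
       R ++ pvRowEmit grid (m : Int), C ++ pvColEmit grid (m : Int), D ++ pvDiagEmit grid (m : Int)⟩ := by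
  simp only [pvRowStep]
  rw [pvVArr_succ, pvMArr_succ, pvAArr_succ]
  simp only [pvBState.mk.injEq]
  refine ⟨trivial, trivial, trivial, ?_, ?_, ?_⟩
  · -- rows
    rw [PySem.List.foldl_append_ite]
    unfold pvRowEmit
    congr 1
    congr 1
    apply List.filter_congr
    intro j hj
    have hb := (PySem.List.mem_pyRange_one).1 hj
    rw [pvHr_eq (PySem.List.pyGetD grid (m : Int) []) grid.length,
        PySem.List.pyGetD_map_pyRange_of_nonneg _ _ _ _ hb.1 hb.2]
  · -- cols
    rw [PySem.List.foldl_append_ite]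
    unfold pvColEmit
    congr 1
    congr 1
    apply List.filter_congr
    intro j hj
    have hb := (PySem.List.mem_pyRange_one).1 hj
    have harr : pvVArr grid (m + 1) = (PySem.List.pyRange 0 (grid.length : Int) 1).map
        (fun j => vrunF grid (m : Int) j) := by
      unfold pvVArr
      rw [if_neg (Nat.succ_ne_zero m), show ((m + 1 : Nat) : Int) - 1 = (m : Int) by push_cast; ring]
    rw [harr, PySem.List.pyGetD_map_pyRange_of_nonneg _ _ _ _ hb.1 hb.2]
  · -- diags
    simp only [pvDoubleIte, PySem.List.foldl_append_eq_flatMap]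
    unfold pvDiagEmit
    congr 1
    apply pvFlatMapCongr
    intro j hj
    have hb := (PySem.List.mem_pyRange_one).1 hj
    have harrM : pvMArr grid (m + 1) = (PySem.List.pyRange 0 (grid.length : Int) 1).map
        (fun j => mrunF grid (m : Int) j) := by
      unfold pvMArr
      rw [if_neg (Nat.succ_ne_zero m), show ((m + 1 : Nat) : Int) - 1 = (m : Int) by push_cast; ring]
    have harrA : pvAArr grid (m + 1) = (PySem.List.pyRange 0 (grid.length : Int) 1).map
        (fun j => arunF grid (grid.length : Int) (m : Int) j) := by
      unfold pvAArr
      rw [if_neg (Nat.succ_ne_zero m), show ((m + 1 : Nat) : Int) - 1 = (m : Int) by push_cast; ring]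
    rw [harrM, harrA,
        PySem.List.pyGetD_map_pyRange_of_nonneg _ _ _ _ (by omega : (0:Int) ≤ j + 3) (by omega : j + 3 < (grid.length : Int)),
        PySem.List.pyGetD_map_pyRange_of_nonneg _ _ _ _ hb.1 (by omega : j < (grid.length : Int))]

lemma pvSweepInv (grid : List (List Int)) (m : Nat) :
    (PySem.List.pyRange 0 (m : Int) 1).foldl (pvRowStep grid (grid.length : Int))
      ⟨List.replicate grid.length 0, List.replicate grid.length 0, List.replicate grid.length 0, [], [], []⟩
    = ⟨pvVArr grid m, pvMArr grid m, pvAArr grid m,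
       (PySem.List.pyRange 0 (m : Int) 1).flatMap (pvRowEmit grid),
       (PySem.List.pyRange 0 (m : Int) 1).flatMap (pvColEmit grid),
       (PySem.List.pyRange 0 (m : Int) 1).flatMap (pvDiagEmit grid)⟩ := by
  induction m with
  | zero => simp [pvVArr, pvMArr, pvAArr, PySem.List.pyRange_one_eq_nil (le_refl (0 : Int))]
  | succ m ih =>
    rw [show ((m + 1 : Nat) : Int) = (m : Int) + 1 by push_cast; ring,
        PySem.List.pyRange_one_succ_right (by positivity), List.foldl_append, ih,
        List.foldl_cons, List.foldl_nil, pvRowStep_spec]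
    simp [List.flatMap_append]

lemma find_fours_alt_eq (grid : List (List Int)) (h : ¬ ((grid.length : Int) < 4)) :
    find_fours_alt grid
      = (PySem.List.pyRange 0 (grid.length : Int) 1).flatMap (pvRowEmit grid)
        ++ ((PySem.List.pyRange 0 (grid.length : Int) 1).flatMap (pvColEmit grid)
        ++ (PySem.List.pyRange 0 (grid.length : Int) 1).flatMap (pvDiagEmit grid)) := by
  simp only [find_fours_alt, if_neg h]
  rw [pvSweepInv grid grid.length]
  simp [List.append_assoc]

-- ---- the three passes agree ----
lemma pvRowsPass (grid : List (List Int)) :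
    (PySem.List.pyRange 0 (grid.length : Int) 1).flatMap (pvRowEmit grid) = pvRowsSpec grid := by
  unfold pvRowsSpec
  apply pvFlatMapCongr
  intro i _
  have hshift := pvShiftFilterMap (grid.length : Int)
      (fun s => pvCell grid i s = pvCell grid i (s + 1) ∧ pvCell grid i (s + 1) = pvCell grid i (s + 2) ∧ pvCell grid i (s + 2) = pvCell grid i (s + 3))
      (fun s => [(i, s), (i, s + 1), (i, s + 2), (i, s + 3)])
  rw [← hshift]
  unfold pvRowEmit
  have hpred : ∀ j ∈ PySem.List.pyRange 0 (grid.length : Int) 1,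
      (decide (4 ≤ hrunF (PySem.List.pyGetD grid i []) j))
        = decide (3 ≤ j ∧ (pvCell grid i (j - 3) = pvCell grid i (j - 3 + 1) ∧ pvCell grid i (j - 3 + 1) = pvCell grid i (j - 3 + 2) ∧ pvCell grid i (j - 3 + 2) = pvCell grid i (j - 3 + 3))) := by
    intro j _
    rw [decide_eq_decide, hrunF_ge4_iff]
    simp only [pvCell]
    rw [show j - 3 + 1 = j - 2 by ring, show j - 3 + 2 = j - 1 by ring, show j - 3 + 3 = j by ring]
  rw [List.filter_congr hpred]
  apply List.map_congr_left
  intro j _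
  rw [show j - 3 + 1 = j - 2 by ring, show j - 3 + 2 = j - 1 by ring, show j - 3 + 3 = j by ring]

lemma pvColsPass (grid : List (List Int)) :
    (PySem.List.pyRange 0 (grid.length : Int) 1).flatMap (pvColEmit grid) = pvColsSpec grid := by
  unfold pvColsSpec
  apply pvShiftFlatMap
  · intro i _ hi3
    unfold pvColEmit
    have hnil : (PySem.List.pyRange 0 (grid.length : Int) 1).filter
        (fun j => decide (4 ≤ vrunF grid i j)) = [] := by
      rw [List.filter_eq_nil_iff]
      intro j _
      simp only [decide_eq_true_eq, vrunF_ge4_iff, not_and]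
      intro h3; omega
    rw [hnil]; rfl
  · intro i hi3 _
    unfold pvColEmit
    have hpred : ∀ j ∈ PySem.List.pyRange 0 (grid.length : Int) 1,
        (decide (4 ≤ vrunF grid i j))
          = decide (pvCell grid (i - 3) j = pvCell grid (i - 3 + 1) j ∧ pvCell grid (i - 3 + 1) j = pvCell grid (i - 3 + 2) j ∧ pvCell grid (i - 3 + 2) j = pvCell grid (i - 3 + 3) j) := by
      intro j _
      rw [decide_eq_decide, vrunF_ge4_iff]
      rw [show i - 3 + 1 = i - 2 by ring, show i - 3 + 2 = i - 1 by ring, show i - 3 + 3 = i by ring]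
      simp [hi3]
    rw [List.filter_congr hpred]
    apply List.map_congr_left
    intro j _
    rw [show i - 3 + 1 = i - 2 by ring, show i - 3 + 2 = i - 1 by ring, show i - 3 + 3 = i by ring]

lemma pvDiagsPass (grid : List (List Int)) :
    (PySem.List.pyRange 0 (grid.length : Int) 1).flatMap (pvDiagEmit grid) = pvDiagsSpec grid := by
  unfold pvDiagsSpec
  apply pvShiftFlatMap
  · intro i _ hi3
    unfold pvDiagEmit
    rw [List.flatMap_eq_nil_iff]
    intro j _
    have h1 : ¬ (4 ≤ mrunF grid i (j + 3)) := by
      rw [mrunF_ge4_iff]; rintro ⟨h3, -, -⟩; omega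
    have h2 : ¬ (4 ≤ arunF grid (grid.length : Int) i j) := by
      rw [arunF_ge4_iff]; rintro ⟨h3, -, -⟩; omega
    rw [if_neg h1, if_neg h2]; rfl
  · intro i hi3 _
    unfold pvDiagEmit
    apply pvFlatMapCongr
    intro j hj
    have hb := (PySem.List.mem_pyRange_one).1 hj
    have hcondM : (4 ≤ mrunF grid i (j + 3)) ↔
        (pvCell grid (i - 3) j = pvCell grid (i - 3 + 1) (j + 1) ∧ pvCell grid (i - 3 + 1) (j + 1) = pvCell grid (i - 3 + 2) (j + 2) ∧ pvCell grid (i - 3 + 2) (j + 2) = pvCell grid (i - 3 + 3) (j + 3)) := by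
      rw [mrunF_ge4_iff]
      rw [show j + 3 - 3 = j by ring, show j + 3 - 2 = j + 1 by ring, show j + 3 - 1 = j + 2 by ring,
          show i - 3 + 1 = i - 2 by ring, show i - 3 + 2 = i - 1 by ring, show i - 3 + 3 = i by ring]
      constructor
      · rintro ⟨-, -, hc⟩; exact hc
      · intro hc; exact ⟨hi3, by omega, hc⟩
    have hcondA : (4 ≤ arunF grid (grid.length : Int) i j) ↔
        (pvCell grid (i - 3) (j + 3) = pvCell grid (i - 3 + 1) (j + 2) ∧ pvCell grid (i - 3 + 1) (j + 2) = pvCell grid (i - 3 + 2) (j + 1) ∧ pvCell grid (i - 3 + 2) (j + 1) = pvCell grid (i - 3 + 3) j) := by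
      rw [arunF_ge4_iff]
      rw [show i - 3 + 1 = i - 2 by ring, show i - 3 + 2 = i - 1 by ring, show i - 3 + 3 = i by ring]
      constructor
      · rintro ⟨-, -, hc⟩; exact hc
      · intro hc; exact ⟨hi3, by omega, hc⟩
    simp only [hcondM, hcondA]
    rw [show i - 3 + 1 = i - 2 by ring, show i - 3 + 2 = i - 1 by ring, show i - 3 + 3 = i by ring]

-- ===== VERDICT (by name: the statement is the Claim_ definition above) =====
theorem find_fours_spec : Claim_equal_find_fours := by
  intro grid _ _
  unfold Spec_find_fours
  rw [find_fours_eq]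
  by_cases h4 : (grid.length : Int) < 4
  · have hnil3 : PySem.List.pyRange 0 ((grid.length : Int) - 3) 1 = [] :=
      PySem.List.pyRange_one_eq_nil (by omega)
    have hA : pvRowsSpec grid = [] := by
      unfold pvRowsSpec
      rw [List.flatMap_eq_nil_iff]
      intro i _
      rw [hnil3]; rfl
    have hB : pvColsSpec grid = [] := by
      unfold pvColsSpec; rw [hnil3]; rfl
    have hC : pvDiagsSpec grid = [] := by
      unfold pvDiagsSpec; rw [hnil3]; rfl
    simp only [find_fours_alt, if_pos h4]
    rw [hA, hB, hC]; rfl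
  · rw [find_fours_alt_eq grid h4, pvRowsPass, pvColsPass, pvDiagsPass, List.append_assoc]
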